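-- pv_equiv track=rewrite | github.com/miliar/Code_Jam_Webscraper | solutions_python/solutions_year14_round0_nr4/625.py | deceitful
-- ===== SOURCE A (Python) =====
-- def deceitful(nb, kb):
--     score = 0
--     while(nb):
--         if nb[-1] > kb[-1]:
--             del nb[-1]
--             score += 1
--         else:
--             del nb[0]
--         del kb[-1]
--
--     return score
-- ===== SOURCE B (Python) =====
-- def deceitful(nb, kb):
--     # Two-pointer rewrite: never mutates its arguments (A empties both lists in place).
--     score = 0
--     j = len(nb) - 1          # back pointer into nb (front deletions never affect the back)
--     k = len(kb) - 1          # back pointer into kb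
--     for _ in range(len(nb)):
--         if nb[j] > kb[k]:
--             score += 1
--             j -= 1
--         k -= 1
--     return score
-- ===== Notes on version B (the rewrite author's own statement) =====
-- stated objective: faster
-- what changed: Replaces A's destructive loop that deletes from both ends of real lists (del nb[0] is O(n)) by a single pass with two back-pointers j,k and a loop of exactly len(nb) iterations, mutating nothing.
import Mathlib
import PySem

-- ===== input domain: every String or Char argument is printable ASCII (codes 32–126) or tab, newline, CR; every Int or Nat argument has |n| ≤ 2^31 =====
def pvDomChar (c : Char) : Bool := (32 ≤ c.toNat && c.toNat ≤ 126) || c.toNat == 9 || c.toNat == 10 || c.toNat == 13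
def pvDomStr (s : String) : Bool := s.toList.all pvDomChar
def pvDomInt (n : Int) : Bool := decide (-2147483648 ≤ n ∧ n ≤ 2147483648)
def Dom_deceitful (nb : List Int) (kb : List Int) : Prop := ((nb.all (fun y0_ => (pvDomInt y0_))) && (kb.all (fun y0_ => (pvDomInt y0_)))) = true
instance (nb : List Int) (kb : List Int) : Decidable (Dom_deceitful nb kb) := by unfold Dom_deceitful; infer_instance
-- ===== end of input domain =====

-- B replaces A's destructive delete-from-both-ends loop by one non-mutating pass with
-- two back-pointers (asymptotically faster); the equivalence proved is about the RETURN
-- value only: A empties both argument lists in place, B mutates nothing.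


-- ===== PORT A =====
-- the while loop: nb, kb are the current (mutated) lists, score the accumulator
def deceitfulGo (nb kb : List Int) (score : Int) : Int :=
  if _h : nb = [] then score
  else
    match PySem.List.pyGet? nb (-1), PySem.List.pyGet? kb (-1) with
    | some a, some b =>
        if a > b then deceitfulGo nb.dropLast kb.dropLast (score + 1)  -- del nb[-1]; score += 1; del kb[-1]
        else deceitfulGo nb.tail kb.dropLast score                     -- del nb[0]; del kb[-1]
    | _, _ => score   -- kb empty: Python raises IndexError (excluded by Pre_)
termination_by nb.length
decreasing_by
  · simpa [List.length_dropLast] using Nat.sub_lt (List.length_pos_iff.mpr _h) one_pos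
  · simpa using Nat.sub_lt (List.length_pos_iff.mpr _h) one_pos

def deceitful (nb : List Int) (kb : List Int) : Int := deceitfulGo nb kb 0

-- ===== PORT B =====
-- the for loop of Source B: m iterations remain, j and k are the back-pointers, score the accumulator
def altGo (nb kb : List Int) : Nat → Int → Int → Int → Int
  | 0, _, _, score => score
  | m + 1, j, k, score =>
    match PySem.List.pyGet? nb j, PySem.List.pyGet? kb k with
    | some a, some b =>
        if a > b then altGo nb kb m (j - 1) (k - 1) (score + 1)
        else altGo nb kb m j (k - 1) score
    | _, _ => score   -- index out of range: Python raises IndexError (excluded by Pre_)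

def deceitful_alt (nb : List Int) (kb : List Int) : Int :=
  altGo nb kb nb.length ((nb.length : Int) - 1) ((kb.length : Int) - 1) 0

-- ===== PRECONDITION & SPEC =====
-- A deletes one kb element per iteration of its len(nb) iterations, so it raises
-- IndexError on kb[-1] whenever kb is shorter than nb; those inputs are excluded.
def Pre_deceitful (nb : List Int) (kb : List Int) : Prop := nb.length ≤ kb.length
instance (nb : List Int) (kb : List Int) : Decidable (Pre_deceitful nb kb) := by
  unfold Pre_deceitful; infer_instance
def pvWitness_deceitful : List Int × List Int := ([3, 1], [2, 2])

def Spec_deceitful (nb : List Int) (kb : List Int) (out : Int) : Prop := out = deceitful_alt nb kb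
instance (nb : List Int) (kb : List Int) (out : Int) : Decidable (Spec_deceitful nb kb out) := by
  unfold Spec_deceitful; infer_instance

-- ===== CLAIM (what is proved, stated in full; the proofs are below) =====
def Claim_equal_deceitful : Prop := ∀ (nb : List Int) (kb : List Int), Dom_deceitful nb kb → Pre_deceitful nb kb → Spec_deceitful nb kb (deceitful nb kb)

-- ===== LEMMAS AND PROOFS =====

-- A on the current segments equals B on the original lists with pointers:
-- current nb = nbseg (sitting inside pre ++ nbseg ++ suf at back index pre.length + n - 1),
-- current kb = kb1 (a prefix of kb1 ++ ksuf with back index kb1.length - 1).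
lemma deceitful_go_eq :
    ∀ (n : Nat) (nbseg pre suf kb1 ksuf : List Int) (s : Int),
      nbseg.length = n → nbseg.length ≤ kb1.length →
      deceitfulGo nbseg kb1 s =
        altGo (pre ++ nbseg ++ suf) (kb1 ++ ksuf) n
          ((pre.length : Int) + n - 1) ((kb1.length : Int) - 1) s := by
  intro n
  induction n with
  | zero =>
      intro nbseg pre suf kb1 ksuf s hlen _
      rw [List.length_eq_zero_iff.mp hlen]
      rw [deceitfulGo]
      simp [altGo]
  | succ m ih =>
      intro nbseg pre suf kb1 ksuf s hlen hle
      have hne : nbseg ≠ [] := by intro h; simp [h] at hlen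
      have hkne : kb1 ≠ [] := by
        intro h; rw [h] at hle; simp [hlen] at hle
      -- the element A reads from nb is the original list's element at index pre.length + m
      have hjidx : (pre.length : Int) + (m + 1 : Nat) - 1 = ((pre.length + m : Nat) : Int) := by
        push_cast; ring
      have hj : PySem.List.pyGet? (pre ++ nbseg ++ suf) ((pre.length : Int) + (m + 1 : Nat) - 1)
          = nbseg.getLast? := by
        rw [hjidx, PySem.List.pyGet?_natCast, List.append_assoc]
        rw [List.getElem?_append_right (by omega)]
        have hm : pre.length + m - pre.length = m := by omega
        rw [hm, List.getElem?_append_left (by omega)]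
        rw [List.getLast?_eq_getElem?, hlen]
        norm_num
      have hkidx : (kb1.length : Int) - 1 = ((kb1.length - 1 : Nat) : Int) := by
        have : 1 ≤ kb1.length := List.length_pos_iff.mpr hkne
        push_cast [this]; ring
      have hk : PySem.List.pyGet? (kb1 ++ ksuf) ((kb1.length : Int) - 1) = kb1.getLast? := by
        rw [hkidx, PySem.List.pyGet?_natCast]
        rw [List.getElem?_append_left (by
          have := List.length_pos_iff.mpr hkne; omega)]
        rw [List.getLast?_eq_getElem?]
      obtain ⟨a, ha⟩ := List.getLast?_isSome.mpr hne |> Option.isSome_iff_exists.mp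
      obtain ⟨b, hb⟩ := List.getLast?_isSome.mpr hkne |> Option.isSome_iff_exists.mp
      rw [deceitfulGo]
      simp only [hne, dite_false, PySem.List.pyGet?_neg_one, ha, hb]
      rw [altGo, hj, hk, ha, hb]
      by_cases hab : a > b
      · simp only [if_pos hab]
        have hdl : nbseg.dropLast ++ (a :: suf) = nbseg ++ suf := by
          rw [← List.singleton_append, ← List.append_assoc, List.dropLast_append_getLast? a ha]
        have hkdl : kb1.dropLast ++ (b :: ksuf) = kb1 ++ ksuf := by
          rw [← List.singleton_append, ← List.append_assoc, List.dropLast_append_getLast? b hb]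
        have := ih nbseg.dropLast pre (a :: suf) kb1.dropLast (b :: ksuf) (s + 1)
          (by simp [List.length_dropLast, hlen]) (by simp [List.length_dropLast]; omega)
        rw [this, List.append_assoc, hdl, hkdl, ← List.append_assoc]
        congr 1
        · push_cast; ring
        · have : 1 ≤ kb1.length := List.length_pos_iff.mpr hkne
          simp [List.length_dropLast]; push_cast [this]; ring
      · simp only [if_neg hab]
        obtain ⟨x, xs, rfl⟩ := List.exists_cons_of_ne_nil hne
        have hxs : xs.length = m := by simpa using hlen
        have hkb1 : m + 1 ≤ kb1.length := by simpa [hxs] using hle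
        have := ih xs (pre ++ [x]) suf kb1.dropLast (b :: ksuf) s hxs
          (by simp [List.length_dropLast]; omega)
        have hkdl : kb1.dropLast ++ (b :: ksuf) = kb1 ++ ksuf := by
          rw [← List.singleton_append, ← List.append_assoc, List.dropLast_append_getLast? b hb]
        rw [List.tail_cons, this, hkdl]
        congr 1
        · simp
        · simp; ring
        · have : 1 ≤ kb1.length := List.length_pos_iff.mpr hkne
          simp [List.length_dropLast]; push_cast [this]; ring

-- ===== VERDICT (by name: the statement is the Claim_ definition above) =====
theorem deceitful_spec : Claim_equal_deceitful := by
  intro nb kb _ hpre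
  unfold Spec_deceitful deceitful deceitful_alt
  have := deceitful_go_eq nb.length nb [] [] kb [] 0 rfl hpre
  simpa using this
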